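-- pv_equiv track=rewrite | github.com/SuperMan-42/nlp | app/src/main/python/textSimilarityDeploy/mathLogicOperation.py | cmpStr
-- ===== SOURCE A (Python) =====
-- def cmpStr(str1,str2): # if str1>=str2 True，否则False
--     cmpFlag = "middle"
--     for i in range(0,min(len(str1),len(str2))):
--         if str1[i]==str2[i]:
--             continue
--         elif str1[i]>str2[i]:
--             cmpFlag = "True"
--         else:
--             cmpFlag = "False"
--     if cmpFlag=="middle":
--         if len(str1)<=len(str2):
--             return True
--         else:
--             return False
--     elif cmpFlag=="True":
--         return True
--     elif cmpFlag=="False":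
--         return False
--     else:
--         return False
-- ===== SOURCE B (Python) =====
-- def cmpStr(str1, str2):
--     # Scan backwards: the last differing position in forward order is the
--     # first difference seen from the end, so we can return immediately.
--     for i in range(min(len(str1), len(str2)) - 1, -1, -1):
--         if str1[i] != str2[i]:
--             return str1[i] > str2[i]
--     return len(str1) <= len(str2)
-- ===== Notes on version B (the rewrite author's own statement) =====
-- stated objective: simpler
-- what changed: Replaces A's full forward scan that keeps overwriting a string flag with a backward scan that returns at the first difference seen from the end (the last forward difference), falling back to the length comparison.
import Mathlib
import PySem

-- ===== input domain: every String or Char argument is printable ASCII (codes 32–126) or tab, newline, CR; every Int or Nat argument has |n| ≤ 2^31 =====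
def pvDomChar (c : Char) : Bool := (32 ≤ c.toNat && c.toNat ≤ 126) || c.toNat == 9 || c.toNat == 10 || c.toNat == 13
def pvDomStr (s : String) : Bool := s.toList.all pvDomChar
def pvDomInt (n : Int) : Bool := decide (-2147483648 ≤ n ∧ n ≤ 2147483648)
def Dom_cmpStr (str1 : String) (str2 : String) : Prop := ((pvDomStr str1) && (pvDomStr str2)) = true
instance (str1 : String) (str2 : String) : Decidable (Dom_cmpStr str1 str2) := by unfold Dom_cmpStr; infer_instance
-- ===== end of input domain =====

-- B replaces A's full forward scan with a flag string by a backward scan with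
-- an early return at the first difference seen from the end (objective: simpler).


-- ===== PORT A =====
-- A's loop body: update the flag string at index i (indices are always in range).
def cmpStrStep (c1 c2 : List Char) (flag : String) (i : Nat) : String :=
  let a := c1.getD i ' '
  let b := c2.getD i ' '
  if a = b then flag
  else if b < a then "True"
  else "False"

def cmpStr (str1 : String) (str2 : String) : Bool :=
  let c1 := str1.toList
  let c2 := str2.toList
  let cmpFlag := (List.range (min c1.length c2.length)).foldl (cmpStrStep c1 c2) "middle"
  if cmpFlag = "middle" then
    (if c1.length ≤ c2.length then true else false)
  else if cmpFlag = "True" then true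
  else if cmpFlag = "False" then false
  else false

-- ===== PORT B =====
-- B's backward loop: argument is how many indices (from the front) remain to scan;
-- it inspects index i going down and returns at the first difference.
def cmpStrBack (c1 c2 : List Char) : Nat → Bool
  | 0 => decide (c1.length ≤ c2.length)
  | i + 1 =>
    let a := c1.getD i ' '
    let b := c2.getD i ' '
    if a ≠ b then decide (b < a) else cmpStrBack c1 c2 i

def cmpStr_alt (str1 : String) (str2 : String) : Bool :=
  cmpStrBack str1.toList str2.toList (min str1.toList.length str2.toList.length)

-- ===== PRECONDITION & SPEC =====
def Spec_cmpStr (str1 : String) (str2 : String) (out : Bool) : Prop := out = cmpStr_alt str1 str2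
instance (str1 : String) (str2 : String) (out : Bool) : Decidable (Spec_cmpStr str1 str2 out) := by unfold Spec_cmpStr; infer_instance

-- ===== CLAIM (what is proved, stated in full; the proofs are below) =====
def Claim_equal_cmpStr : Prop := ∀ (str1 : String) (str2 : String), Dom_cmpStr str1 str2 → Spec_cmpStr str1 str2 (cmpStr str1 str2)

-- ===== LEMMAS AND PROOFS =====

-- A's flag after scanning the first n indices determines (and is determined by)
-- B's backward scan over the same n indices.
theorem flag_back (c1 c2 : List Char) (n : Nat) :
    ((List.range n).foldl (cmpStrStep c1 c2) "middle" = "middle"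
        ∧ cmpStrBack c1 c2 n = decide (c1.length ≤ c2.length))
    ∨ ((List.range n).foldl (cmpStrStep c1 c2) "middle" = "True"
        ∧ cmpStrBack c1 c2 n = true)
    ∨ ((List.range n).foldl (cmpStrStep c1 c2) "middle" = "False"
        ∧ cmpStrBack c1 c2 n = false) := by
  induction n with
  | zero => left; exact ⟨rfl, rfl⟩
  | succ n ih =>
    rw [List.range_succ, List.foldl_append]
    simp only [List.foldl_cons, List.foldl_nil]
    show _ ∨ _ ∨ _
    by_cases h : c1[n]?.getD ' ' = c2[n]?.getD ' '
    · have hb : cmpStrBack c1 c2 (n + 1) = cmpStrBack c1 c2 n := by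
        simp [cmpStrBack, List.getD, h]
      have hs : ∀ f, cmpStrStep c1 c2 f n = f := by
        intro f; simp [cmpStrStep, List.getD, h]
      rw [hb, hs]
      exact ih
    · have hs : ∀ f, cmpStrStep c1 c2 f n
          = (if c2[n]?.getD ' ' < c1[n]?.getD ' ' then "True" else "False") := by
        intro f; simp [cmpStrStep, List.getD, h]
      have hb : cmpStrBack c1 c2 (n + 1) = decide (c2[n]?.getD ' ' < c1[n]?.getD ' ') := by
        simp [cmpStrBack, List.getD, h]
      rw [hs, hb]
      by_cases hlt : c2[n]?.getD ' ' < c1[n]?.getD ' '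
      · right; left; simp [hlt]
      · right; right; simp [hlt]

-- ===== VERDICT (by name: the statement is the Claim_ definition above) =====
theorem cmpStr_spec : Claim_equal_cmpStr := by
  intro str1 str2 _
  unfold Spec_cmpStr cmpStr cmpStr_alt
  rcases flag_back str1.toList str2.toList (min str1.toList.length str2.toList.length)
    with ⟨h1, h2⟩ | ⟨h1, h2⟩ | ⟨h1, h2⟩ <;>
    simp only [String.length_toList] at h1 h2 <;>
    simp [h1, h2]
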